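-- pv_equiv track=rewrite | github.com/RideGreg/LeetCode | Python/palindrome-removal.py | minimumMoves_kamyu
-- ===== SOURCE A (Python) =====
-- def minimumMoves_kamyu(arr):
--     """
--     :type arr: List[int]
--     :rtype: int
--     """
--     N = len(arr)
--     dp = [[(1 if i == j else 0) for i in range(N)] for j in range(N)]
--     for sz in range(2, N+1):
--         for i in range(N-sz+1):
--             j = i+sz-1
--             if sz == 2:
--                 dp[i][j] = 1 if arr[i] == arr[j] else 2
--             else:
--                 dp[i][j] = 1+dp[i+1][j]
--                 # compare i-1, i+2..j-1, j
--                 if arr[i] == arr[i+1]: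
--                     dp[i][j] = min(dp[i][j], 1 + dp[i+2][j])
--                 for k in range(i+2, j):
--                     if arr[i] == arr[k]:
--                         dp[i][j] = min(dp[i][j], dp[i+1][k-1] + dp[k+1][j])
--                 if arr[i] == arr[j]:
--                     dp[i][j] = min(dp[i][j], dp[i+1][j-1])
--     return dp[0][len(arr)-1]
-- ===== SOURCE B (Python) =====
-- def minimumMoves_kamyu(arr):
--     memo = {}
--
--     def f(i, j):
--         if i > j:
--             return 0
--         if i == j:
--             return 1
--         if (i, j) in memo:
--             return memo[(i, j)]
--         res = 1 + f(i + 1, j)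
--         if arr[i] == arr[i + 1]:
--             res = min(res, 1 + f(i + 2, j))
--         for k in range(i + 2, j):
--             if arr[i] == arr[k]:
--                 res = min(res, f(i + 1, k - 1) + f(k + 1, j))
--         if arr[i] == arr[j]:
--             res = min(res, f(i + 1, j - 1) if i + 1 <= j - 1 else 1)
--         memo[(i, j)] = res
--         return res
--
--     return f(0, len(arr) - 1)
-- ===== Notes on version B (the rewrite author's own statement) =====
-- stated objective: alternative
-- what changed: Replaced the bottom-up size-by-size DP table (a list-of-lists filled for every interval of every size) with a top-down recursion f(i,j) over intervals memoized in a dict, called as f(0, len(arr)-1).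
import Mathlib
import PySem

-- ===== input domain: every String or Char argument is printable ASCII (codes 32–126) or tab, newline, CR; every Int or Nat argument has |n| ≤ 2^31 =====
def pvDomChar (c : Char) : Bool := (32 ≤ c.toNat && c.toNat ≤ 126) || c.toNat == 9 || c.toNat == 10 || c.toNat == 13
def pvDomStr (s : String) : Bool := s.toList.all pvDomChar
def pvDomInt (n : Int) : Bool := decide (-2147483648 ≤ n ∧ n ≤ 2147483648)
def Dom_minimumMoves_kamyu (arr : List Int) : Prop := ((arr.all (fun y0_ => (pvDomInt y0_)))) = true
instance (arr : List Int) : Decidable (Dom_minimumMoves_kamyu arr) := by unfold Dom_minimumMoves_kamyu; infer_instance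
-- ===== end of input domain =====

-- B replaces A's bottom-up size-by-size DP table with a top-down interval recursion f(i,j)
-- memoized in a dict: a different decomposition of the same computation.

-- ===== PORT A =====
-- arr[i]; every access A performs is in range (loop bounds guarantee it), so getD is exact there
def pvA (arr : List Int) (i : Nat) : Int := arr.getD i 0

-- dp[i][j] read / write on the list-of-lists table (indices are in range wherever A uses them)
def pvGet2 (dp : List (List Int)) (i j : Nat) : Int := (dp.getD i []).getD j 0
def pvSet2 (dp : List (List Int)) (i j : Nat) (v : Int) : List (List Int) :=
  dp.set i ((dp.getD i []).set j v)

-- dp = [[(1 if i == j else 0) for i in range(N)] for j in range(N)]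
def pvInit (N : Nat) : List (List Int) :=
  (List.range N).map (fun jj => (List.range N).map (fun ii => if ii = jj then (1 : Int) else 0))

-- the body of A's inner loop: the successive assignments to dp[i][j] as a let-chain
-- (range(i+2, j) is List.range' (i+2) (j-(i+2)) : unit-step nonnegative range, exact)
def pvCell (arr : List Int) (dp : List (List Int)) (sz i : Nat) : Int :=
  let j := i + sz - 1
  if sz = 2 then (if pvA arr i = pvA arr j then 1 else 2)
  else
    let v := 1 + pvGet2 dp (i+1) j
    let v := if pvA arr i = pvA arr (i+1) then min v (1 + pvGet2 dp (i+2) j) else v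
    let v := (List.range' (i+2) (j - (i+2))).foldl
        (fun v k => if pvA arr i = pvA arr k then min v (pvGet2 dp (i+1) (k-1) + pvGet2 dp (k+1) j) else v) v
    if pvA arr i = pvA arr j then min v (pvGet2 dp (i+1) (j-1)) else v

-- for i in range(N-sz+1): dp[i][i+sz-1] = …
def pvRow (arr : List Int) (sz : Nat) (dp : List (List Int)) : List (List Int) :=
  (List.range (arr.length - sz + 1)).foldl (fun dp i => pvSet2 dp i (i+sz-1) (pvCell arr dp sz i)) dp

-- for sz in range(2, N+1): range(2, N+1) = List.range' 2 (N-1) (nonneg unit-step, exact);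
-- return dp[0][len(arr)-1] — on arr = [] Python raises IndexError there (excluded by Pre_)
def minimumMoves_kamyu (arr : List Int) : Int :=
  let N := arr.length
  let dp := (List.range' 2 (N - 1)).foldl (fun dp sz => pvRow arr sz dp) (pvInit N)
  pvGet2 dp 0 (N - 1)

-- ===== PORT B =====
-- f(i, j) of Source B; the memo dict is a pure cache of f's values, so the port is the recursion itself
def pvF (arr : List Int) (i j : Nat) : Int :=
  if j < i then 0
  else if i = j then 1
  else
    let res := 1 + pvF arr (i+1) j
    let res := if pvA arr i = pvA arr (i+1) then min res (1 + pvF arr (i+2) j) else res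
    let res := (List.range' (i+2) (j - (i+2))).attach.foldl
        (fun r kk => if pvA arr i = pvA arr kk.1 then min r (pvF arr (i+1) (kk.1-1) + pvF arr (kk.1+1) j) else r) res
    if pvA arr i = pvA arr j then min res (if i+1 ≤ j-1 then pvF arr (i+1) (j-1) else 1) else res
termination_by j + 1 - i
decreasing_by
  all_goals first
    | omega
    | (have hb := List.mem_range'_1.mp kk.2; omega)

-- f(0, len(arr)-1): for arr = [] Python calls f(0, -1) whose i > j base case returns 0;
-- Nat cannot hold -1, so that base case is written as the length-0 test
def minimumMoves_kamyu_alt (arr : List Int) : Int :=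
  if arr.length = 0 then 0 else pvF arr 0 (arr.length - 1)

-- ===== PRECONDITION & SPEC =====
-- Pre_ excludes only the empty list, on which A raises IndexError (dp[0][-1] on an empty table)
def Pre_minimumMoves_kamyu (arr : List Int) : Prop := arr ≠ []
instance (arr : List Int) : Decidable (Pre_minimumMoves_kamyu arr) := by unfold Pre_minimumMoves_kamyu; infer_instance
def pvWitness_minimumMoves_kamyu : List Int := [1, 2, 1]

def Spec_minimumMoves_kamyu (arr : List Int) (out : Int) : Prop := out = minimumMoves_kamyu_alt arr
instance (arr : List Int) (out : Int) : Decidable (Spec_minimumMoves_kamyu arr out) := by unfold Spec_minimumMoves_kamyu; infer_instance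

-- ===== CLAIM (what is proved, stated in full; the proofs are below) =====
def Claim_equal_minimumMoves_kamyu : Prop := ∀ (arr : List Int), Dom_minimumMoves_kamyu arr → Pre_minimumMoves_kamyu arr → Spec_minimumMoves_kamyu arr (minimumMoves_kamyu arr)
-- ===== LEMMAS AND PROOFS =====

-- pvF's body with the recursive calls abstracted into an oracle g (and the attach removed)
def pvFBody (arr : List Int) (g : Nat → Nat → Int) (i j : Nat) : Int :=
  if j < i then 0
  else if i = j then 1
  else
    let res := 1 + g (i+1) j
    let res := if pvA arr i = pvA arr (i+1) then min res (1 + g (i+2) j) else res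
    let res := (List.range' (i+2) (j - (i+2))).foldl
        (fun r k => if pvA arr i = pvA arr k then min r (g (i+1) (k-1) + g (k+1) j) else r) res
    if pvA arr i = pvA arr j then min res (if i+1 ≤ j-1 then g (i+1) (j-1) else 1) else res

theorem pvF_eq_body (arr : List Int) (i j : Nat) : pvF arr i j = pvFBody arr (pvF arr) i j := by
  rw [pvF, pvFBody]
  simp only [List.foldl_attach
    (f := fun r k => if pvA arr i = pvA arr k then min r (pvF arr (i+1) (k-1) + pvF arr (k+1) j) else r)]

-- table shape: N rows of length N
def pvShape (N : Nat) (dp : List (List Int)) : Prop :=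
  dp.length = N ∧ ∀ t, t < N → (dp.getD t []).length = N

-- invariant: every in-range cell of interval size ≤ s already holds B's value
def pvGood (arr : List Int) (N s : Nat) (dp : List (List Int)) : Prop :=
  ∀ i j, i ≤ j → j < N → j + 1 - i ≤ s → pvGet2 dp i j = pvF arr i j

theorem pvShape_init (N : Nat) : pvShape N (pvInit N) := by
  constructor
  · simp [pvInit]
  · intro t ht
    simp [pvInit, List.getD_eq_getElem?_getD, ht]

theorem pvGet2_init (N i j : Nat) (hi : i < N) (hj : j < N) :
    pvGet2 (pvInit N) i j = if j = i then 1 else 0 := by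
  simp [pvInit, pvGet2, List.getD_eq_getElem?_getD, hi, hj]

theorem pvGetD_set {α : Type} (l : List α) (n m : Nat) (a d : α) :
    (l.set n a).getD m d = if n = m ∧ n < l.length then a else l.getD m d := by
  by_cases h1 : n = m
  · subst h1
    by_cases h2 : n < l.length
    · simp [List.getD_eq_getElem?_getD, h2]
    · simp [List.getD_eq_getElem?_getD, h2]
  · simp [List.getD_eq_getElem?_getD, h1]

theorem pvShape_set2 (N : Nat) (dp : List (List Int)) (i j : Nat) (v : Int)
    (h : pvShape N dp) : pvShape N (pvSet2 dp i j v) := by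
  obtain ⟨h1, h2⟩ := h
  refine ⟨by simp [pvSet2, h1], ?_⟩
  intro t ht
  rw [pvSet2, pvGetD_set]
  split_ifs with hcond
  · obtain ⟨rfl, _⟩ := hcond
    rw [List.length_set]
    exact h2 _ ht
  · exact h2 t ht

theorem pvGet2_set2 (N : Nat) (dp : List (List Int)) (i j : Nat) (v : Int)
    (h : pvShape N dp) (hi : i < N) (hj : j < N) (i' j' : Nat) :
    pvGet2 (pvSet2 dp i j v) i' j' = if i' = i ∧ j' = j then v else pvGet2 dp i' j' := by
  obtain ⟨h1, h2⟩ := h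
  have hilen : i < dp.length := by omega
  have hrow : (dp.getD i []).length = N := h2 i hi
  rw [pvGet2, pvSet2, pvGetD_set]
  by_cases hii : i' = i
  · subst hii
    rw [if_pos ⟨rfl, hilen⟩, pvGetD_set]
    by_cases hjj : j' = j
    · subst hjj
      rw [if_pos ⟨rfl, by omega⟩, if_pos ⟨rfl, rfl⟩]
    · rw [if_neg (fun hc => hjj hc.1.symm), if_neg (fun hc => hjj hc.2)]
      rfl
  · rw [if_neg (fun hc => hii hc.1.symm), if_neg (fun hc => hii hc.1)]
    rfl

theorem pvF_diag (arr : List Int) (i : Nat) : pvF arr i i = 1 := by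
  rw [pvF_eq_body, pvFBody]; simp

-- size-2 value of B's recursion
theorem pvF_two (arr : List Int) (i : Nat) :
    pvF arr i (i+1) = if pvA arr i = pvA arr (i+1) then 1 else 2 := by
  rw [pvF_eq_body, pvFBody]
  have h0 : pvF arr (i+1) (i+1) = 1 := pvF_diag arr (i+1)
  have h1 : pvF arr (i+2) (i+1) = 0 := by rw [pvF_eq_body, pvFBody]; simp
  have hr : (i+1) - (i+2) = 0 := by omega
  by_cases h : pvA arr i = pvA arr (i+1) <;>
    simp [h, h0, h1, hr, show ¬ (i+1 < i) by omega]

-- the freshly computed cell equals B's recursion, given all smaller intervals are correct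
theorem pvCell_eq (arr : List Int) (N : Nat) (dp : List (List Int)) (sz i : Nat)
    (hN : N = arr.length) (hsz : 2 ≤ sz) (hj : i + sz - 1 < N)
    (hg : pvGood arr N (sz - 1) dp) :
    pvCell arr dp sz i = pvF arr i (i + sz - 1) := by
  by_cases h2 : sz = 2
  · subst h2
    rw [pvCell]
    rw [if_pos rfl]
    rw [show i + 2 - 1 = i + 1 by omega, pvF_two]
  · -- sz ≥ 3
    have hsz3 : 3 ≤ sz := by omega
    rw [pvCell, pvF_eq_body, pvFBody]
    rw [if_neg h2, if_neg (show ¬ i + sz - 1 < i by omega), if_neg (show i ≠ i + sz - 1 by omega),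
        if_pos (show i + 1 ≤ i + sz - 1 - 1 by omega)]
    have e1 : pvGet2 dp (i+1) (i+sz-1) = pvF arr (i+1) (i+sz-1) := hg (i+1) _ (by omega) hj (by omega)
    have e2 : pvGet2 dp (i+2) (i+sz-1) = pvF arr (i+2) (i+sz-1) := hg (i+2) _ (by omega) hj (by omega)
    have e3 : pvGet2 dp (i+1) (i+sz-1-1) = pvF arr (i+1) (i+sz-1-1) := hg (i+1) _ (by omega) (by omega) (by omega)
    rw [e1, e2, e3]
    have hmem : ∀ (a : Int), ∀ k ∈ List.range' (i+2) ((i+sz-1) - (i+2)),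
        (fun v k => if pvA arr i = pvA arr k then min v (pvGet2 dp (i+1) (k-1) + pvGet2 dp (k+1) (i+sz-1)) else v) a k
          = (fun r k => if pvA arr i = pvA arr k then min r (pvF arr (i+1) (k-1) + pvF arr (k+1) (i+sz-1)) else r) a k := by
      intro a k hk
      have hkb := List.mem_range'_1.mp hk
      have hk1 : i + 2 ≤ k := hkb.1
      have hk2 : k < i + sz - 1 := by omega
      simp only
      rw [hg (i+1) (k-1) (by omega) (by omega) (by omega),
          hg (k+1) (i+sz-1) (by omega) hj (by omega)]
    have hfold : ∀ a : Int,
        List.foldl (fun v k => if pvA arr i = pvA arr k then min v (pvGet2 dp (i+1) (k-1) + pvGet2 dp (k+1) (i+sz-1)) else v) a (List.range' (i+2) ((i+sz-1) - (i+2)))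
          = List.foldl (fun r k => if pvA arr i = pvA arr k then min r (pvF arr (i+1) (k-1) + pvF arr (k+1) (i+sz-1)) else r) a (List.range' (i+2) ((i+sz-1) - (i+2))) :=
      fun a => List.foldl_ext _ _ a hmem
    simp only [hfold]

-- one whole size-sz pass preserves the shape, keeps smaller intervals, and fills size sz
theorem pvRow_good (arr : List Int) (N sz : Nat)
    (hN : N = arr.length) (hsz : 2 ≤ sz) (hszN : sz ≤ N)
    (dp : List (List Int)) (hs : pvShape N dp) (hg : pvGood arr N (sz - 1) dp) :
    pvShape N (pvRow arr sz dp) ∧ pvGood arr N sz (pvRow arr sz dp) := by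
  have key : ∀ t, t ≤ N - sz + 1 →
      pvShape N ((List.range t).foldl (fun dp i => pvSet2 dp i (i+sz-1) (pvCell arr dp sz i)) dp) ∧
      pvGood arr N (sz - 1) ((List.range t).foldl (fun dp i => pvSet2 dp i (i+sz-1) (pvCell arr dp sz i)) dp) ∧
      (∀ i', i' < t →
        pvGet2 ((List.range t).foldl (fun dp i => pvSet2 dp i (i+sz-1) (pvCell arr dp sz i)) dp) i' (i'+sz-1)
          = pvF arr i' (i'+sz-1)) := by
    intro t
    induction t with
    | zero => intro _; exact ⟨hs, hg, by omega⟩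
    | succ t ih =>
      intro ht
      obtain ⟨ihs, ihg, ihnew⟩ := ih (by omega)
      have hstep : (List.range (t+1)).foldl (fun dp i => pvSet2 dp i (i+sz-1) (pvCell arr dp sz i)) dp
          = pvSet2 ((List.range t).foldl (fun dp i => pvSet2 dp i (i+sz-1) (pvCell arr dp sz i)) dp) t (t+sz-1)
              (pvCell arr ((List.range t).foldl (fun dp i => pvSet2 dp i (i+sz-1) (pvCell arr dp sz i)) dp) sz t) := by
        rw [List.range_succ, List.foldl_append]
        rfl
      have htj : t + sz - 1 < N := by omega
      have htN : t < N := by omega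
      have hcell : pvCell arr ((List.range t).foldl (fun dp i => pvSet2 dp i (i+sz-1) (pvCell arr dp sz i)) dp) sz t
          = pvF arr t (t+sz-1) := pvCell_eq arr N _ sz t hN hsz htj ihg
      rw [hstep]
      refine ⟨pvShape_set2 N _ t (t+sz-1) _ ihs, ?_, ?_⟩
      · intro i j hij hjN hsize
        rw [pvGet2_set2 N _ t (t+sz-1) _ ihs htN htj i j]
        have : ¬ (i = t ∧ j = t+sz-1) := by
          rintro ⟨rfl, rfl⟩; omega
        rw [if_neg this]
        exact ihg i j hij hjN hsize
      · intro i' hi'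
        rw [pvGet2_set2 N _ t (t+sz-1) _ ihs htN htj i' (i'+sz-1)]
        by_cases hit : i' = t
        · subst hit
          rw [if_pos ⟨rfl, rfl⟩, hcell]
        · have : ¬ (i' = t ∧ i'+sz-1 = t+sz-1) := by
            rintro ⟨rfl, _⟩; exact hit rfl
          rw [if_neg this]
          exact ihnew i' (by omega)
  obtain ⟨ks, kg, knew⟩ := key (N - sz + 1) (le_refl _)
  have hrow : pvRow arr sz dp
      = (List.range (N - sz + 1)).foldl (fun dp i => pvSet2 dp i (i+sz-1) (pvCell arr dp sz i)) dp := by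
    rw [pvRow, hN]
  refine ⟨by rw [hrow]; exact ks, ?_⟩
  intro i j hij hjN hsize
  rw [hrow]
  by_cases hsm : j + 1 - i ≤ sz - 1
  · exact kg i j hij hjN hsm
  · have hjsz : j = i + sz - 1 := by omega
    have hit : i < N - sz + 1 := by omega
    rw [hjsz]
    exact knew i hit

-- after folding all sizes 2 .. m+1, every interval of size ≤ m+1 is correct
theorem pvFold_good (arr : List Int) (N : Nat) (hN : N = arr.length) :
    ∀ m, m + 1 ≤ N →
      pvShape N ((List.range' 2 m).foldl (fun dp sz => pvRow arr sz dp) (pvInit N)) ∧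
      pvGood arr N (m+1) ((List.range' 2 m).foldl (fun dp sz => pvRow arr sz dp) (pvInit N)) := by
  intro m
  induction m with
  | zero =>
    intro _
    simp only [List.range'_zero, List.foldl_nil]
    refine ⟨pvShape_init N, ?_⟩
    intro i j hij hjN hsize
    have hii : j = i := by omega
    subst hii
    rw [pvGet2_init N j j (by omega) hjN, pvF_diag]
    simp
  | succ m ih =>
    intro hm
    obtain ⟨ihs, ihg⟩ := ih (by omega)
    have hsplit : List.range' 2 (m+1) = List.range' 2 m ++ [2 + m] := by
      simpa using (List.range'_concat (step := 1) (s := 2) (n := m))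
    rw [hsplit, List.foldl_append]
    simp only [List.foldl_cons, List.foldl_nil]
    have := pvRow_good arr N (2+m) hN (by omega) (by omega) _ ihs (by
      have : 2 + m - 1 = m + 1 := by omega
      rw [this]; exact ihg)
    refine ⟨this.1, ?_⟩
    intro i j hij hjN hsize
    exact this.2 i j hij hjN (by omega)

-- ===== VERDICT (by name: the statement is the Claim_ definition above) =====
theorem minimumMoves_kamyu_spec : Claim_equal_minimumMoves_kamyu := by
  intro arr _ hpre
  unfold Spec_minimumMoves_kamyu
  have hN : arr.length ≠ 0 := by
    intro h
    exact hpre (List.eq_nil_of_length_eq_zero h)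
  have hN1 : 1 ≤ arr.length := by omega
  rw [minimumMoves_kamyu, minimumMoves_kamyu_alt, if_neg hN]
  have hmain := pvFold_good arr arr.length rfl (arr.length - 1) (by omega)
  exact hmain.2 0 (arr.length - 1) (by omega) (by omega) (by omega)
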